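-- pv_equiv track=rewrite | github.com/AwfulIceCream/ukr-tokenizer | build_hybrid_tokenizer.py | compute_token_closure
-- ===== SOURCE A (Python) =====
-- from typing import Dict, Iterable, List, Optional, Sequence, Set, Tuple
--
-- def compute_token_closure(
--     token: str,
--     dependency_map: Dict[str, Tuple[str, str, int]],
--     preserved_tokens: Set[str],
--     cache: Dict[str, Tuple[Set[str], Set[int]]],
-- ) -> Tuple[Set[str], Set[int]]:
--     if token in preserved_tokens:
--         return set(), set()
--     if token in cache:
--         cached_tokens, cached_merges = cache[token]
--         return set(cached_tokens), set(cached_merges)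
--
--     if token not in dependency_map:
--         result = ({token}, set())
--         cache[token] = (set(result[0]), set(result[1]))
--         return result
--
--     left, right, merge_idx = dependency_map[token]
--     tokens_left, merges_left = compute_token_closure(left, dependency_map, preserved_tokens, cache)
--     tokens_right, merges_right = compute_token_closure(right, dependency_map, preserved_tokens, cache)
--
--     required_tokens = tokens_left | tokens_right | {token}
--     required_merges = merges_left | merges_right | {merge_idx}
--     cache[token] = (set(required_tokens), set(required_merges))
--     return required_tokens, required_merges
-- ===== SOURCE B (Python) =====
-- def compute_token_closure(token, dependency_map, preserved_tokens, cache):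
--     # Bottom-up dynamic-programming sweep instead of top-down memoized recursion.
--     # Return value matches A; the cache is populated differently (B caches every
--     # resolvable key of the map, A caches exactly the visited subtree).
--     if token in preserved_tokens:
--         return set(), set()
--     if token in cache:
--         cached_tokens, cached_merges = cache[token]
--         return set(cached_tokens), set(cached_merges)
--     if token not in dependency_map:
--         cache[token] = ({token}, set())
--         return {token}, set()
--
--     def resolved(x):
--         return x in preserved_tokens or x in cache or x not in dependency_map
--
--     def contrib(x):
--         if x in preserved_tokens:
--             return set(), set()
--         if x in cache:
--             return cache[x]
--         return {x}, set()
--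
--     for _ in range(len(dependency_map) + 1):
--         if token in cache:
--             break
--         for key, (left, right, merge_idx) in dependency_map.items():
--             if key in cache or key in preserved_tokens:
--                 continue
--             if resolved(left) and resolved(right):
--                 lt, lm = contrib(left)
--                 rt, rm = contrib(right)
--                 cache[key] = (lt | rt | {key}, lm | rm | {merge_idx})
--     toks, merges = cache[token]
--     return set(toks), set(merges)
-- ===== Notes on version B (the rewrite author's own statement) =====
-- stated objective: alternative
-- what changed: Replaces the top-down memoized recursion by an iterative bottom-up dynamic-programming sweep over the dependency map that caches every key whose two children are already resolved, repeating until the requested token is cached; equivalence is about the return value (both mutate the cache, but populate it differently).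
import Mathlib
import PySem

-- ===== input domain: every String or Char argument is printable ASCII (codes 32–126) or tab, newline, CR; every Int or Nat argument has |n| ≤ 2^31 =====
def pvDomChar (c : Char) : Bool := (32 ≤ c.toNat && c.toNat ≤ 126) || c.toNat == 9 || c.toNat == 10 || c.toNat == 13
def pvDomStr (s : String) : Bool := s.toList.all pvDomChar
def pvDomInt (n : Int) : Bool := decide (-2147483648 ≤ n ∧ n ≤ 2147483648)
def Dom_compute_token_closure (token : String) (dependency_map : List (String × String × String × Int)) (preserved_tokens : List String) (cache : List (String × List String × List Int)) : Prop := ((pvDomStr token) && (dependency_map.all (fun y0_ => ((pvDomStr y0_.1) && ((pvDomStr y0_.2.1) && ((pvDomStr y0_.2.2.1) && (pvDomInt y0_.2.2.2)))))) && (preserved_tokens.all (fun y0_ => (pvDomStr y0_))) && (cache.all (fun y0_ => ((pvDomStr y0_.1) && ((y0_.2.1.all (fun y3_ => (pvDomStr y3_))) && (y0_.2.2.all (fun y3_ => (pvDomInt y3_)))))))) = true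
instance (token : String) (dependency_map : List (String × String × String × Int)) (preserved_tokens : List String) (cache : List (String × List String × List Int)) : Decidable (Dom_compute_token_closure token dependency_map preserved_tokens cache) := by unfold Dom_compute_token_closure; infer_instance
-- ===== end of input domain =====

-- B replaces A's top-down memoized recursion by a bottom-up DP sweep over the map ("alternative"
-- decomposition, same return value); BOTH mutate the Python cache argument, but populate it
-- differently — the equivalence proved here is about the RETURN value only.

-- ===== PORT A =====
-- cache[k] = v on a dict (overwrite keeps position, new key appends); shared by both ports
def pvDictInsert {ν : Type} (c : List (String × ν)) (k : String) (v : ν) : List (String × ν) :=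
  if (c.lookup k).isSome then c.map (fun e => if e.1 == k then (k, v) else e) else c ++ [(k, v)]

-- literal transliteration of A's recursion; the Nat argument is fuel (a totality guard only:
-- under Pre_ the recursion depth is at most dependency_map.length + 2, proved below)
def pvAuxA (dep : List (String × String × String × Int)) (pres : List String) :
    Nat → String → List (String × List String × List Int) →
    Option ((List String × List Int) × List (String × List String × List Int))
  | 0, _, _ => none
  | Nat.succ f, token, cache =>
    if pres.contains token then some (([], []), cache)
    else
      match cache.lookup token with
      | some (ct, cm) => some ((PySem.Set.ofList ct, PySem.Set.ofList cm), cache)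
      | none =>
        match dep.lookup token with
        | none =>
          some (([token], []), pvDictInsert cache token (PySem.Set.ofList [token], PySem.Set.ofList ([] : List Int)))
        | some (l, r, m) =>
          match pvAuxA dep pres f l cache with
          | none => none
          | some ((tl, ml), c1) =>
            match pvAuxA dep pres f r c1 with
            | none => none
            | some ((tr, mr), c2) =>
              let reqT := PySem.Set.union (PySem.Set.union tl tr) [token]
              let reqM := PySem.Set.union (PySem.Set.union ml mr) [m]
              some ((reqT, reqM), pvDictInsert c2 token (PySem.Set.ofList reqT, PySem.Set.ofList reqM))

def compute_token_closure (token : String) (dependency_map : List (String × String × String × Int)) (preserved_tokens : List String) (cache : List (String × List String × List Int)) : List String × List Int :=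
  match pvAuxA dependency_map preserved_tokens (dependency_map.length + 2) token cache with
  | some (res, _) => res
  | none => ([], [])   -- fuel exhaustion: unreachable under Pre_ (A diverges there)

-- ===== PORT B =====
def pvResolved (dep : List (String × String × String × Int)) (pres : List String) (c : List (String × List String × List Int)) (x : String) : Bool :=
  pres.contains x || (c.lookup x).isSome || (dep.lookup x).isNone

def pvContrib (pres : List String) (c : List (String × List String × List Int)) (x : String) : List String × List Int :=
  if pres.contains x then ([], [])
  else match c.lookup x with
  | some v => v
  | none => ([x], [])

-- one item of the inner `for key,(left,right,merge_idx) in dependency_map.items()` loop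
def pvSweepStep (dep : List (String × String × String × Int)) (pres : List String) (c : List (String × List String × List Int)) (e : String × String × String × Int) : List (String × List String × List Int) :=
  if (c.lookup e.1).isSome || pres.contains e.1 then c
  else if pvResolved dep pres c e.2.1 && pvResolved dep pres c e.2.2.1 then
    let lc := pvContrib pres c e.2.1
    let rc := pvContrib pres c e.2.2.1
    pvDictInsert c e.1 (PySem.Set.union (PySem.Set.union lc.1 rc.1) [e.1], PySem.Set.union (PySem.Set.union lc.2 rc.2) [e.2.2.2])
  else c

-- the outer `for _ in range(len(dependency_map)+1)` loop with its `break`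
def pvSweeps (dep : List (String × String × String × Int)) (pres : List String) (token : String) :
    Nat → List (String × List String × List Int) → List (String × List String × List Int)
  | 0, c => c
  | Nat.succ n, c =>
    if (c.lookup token).isSome then c
    else pvSweeps dep pres token n (dep.foldl (pvSweepStep dep pres) c)

def compute_token_closure_alt (token : String) (dependency_map : List (String × String × String × Int)) (preserved_tokens : List String) (cache : List (String × List String × List Int)) : List String × List Int :=
  if preserved_tokens.contains token then ([], [])
  else
    match cache.lookup token with
    | some (ct, cm) => (PySem.Set.ofList ct, PySem.Set.ofList cm)
    | none =>
      match dependency_map.lookup token with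
      | none => ([token], [])
      | some _ =>
        match (pvSweeps dependency_map preserved_tokens token (dependency_map.length + 1) cache).lookup token with
        | some (ct, cm) => (PySem.Set.ofList ct, PySem.Set.ofList cm)
        | none => ([], [])   -- Python: KeyError; unreachable under Pre_

-- ===== PRECONDITION & SPEC =====
-- effective dependency edges: from an unresolved key to its child keys that are themselves
-- neither preserved nor initially cached (recursion/resolution stops everywhere else)
def pvNbrs (dep : List (String × String × String × Int)) (pres : List String) (cache0 : List (String × List String × List Int)) (x : String) : List String :=
  if pres.contains x || (cache0.lookup x).isSome then []
  else match dep.lookup x with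
  | none => []
  | some (l, r, _) => [l, r].filter (fun c => !(pres.contains c || (cache0.lookup c).isSome) && (dep.lookup c).isSome)

def pvFrontStep (dep : List (String × String × String × Int)) (pres : List String) (cache0 : List (String × List String × List Int)) (F : List String) : List String :=
  (F.flatMap (pvNbrs dep pres cache0)).dedup

def pvFrontIter (dep : List (String × String × String × Int)) (pres : List String) (cache0 : List (String × List String × List Int)) : Nat → List String → List String
  | 0, F => F
  | Nat.succ n, F => pvFrontIter dep pres cache0 n (pvFrontStep dep pres cache0 F)

-- Pre_: (1) the token cannot reach a CYCLE of the effective dependency graph — stated as: no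
-- node is reachable from token by a path of dependency_map.length + 1 edges (any such path is
-- longer than the number of keys, so it revisits a node; conversely an acyclic graph has no such
-- path).  pvFrontIter n [x] is plain graph reachability on the INPUT ("nodes at path-distance
-- exactly n from x"), not a simulation of either port: it tracks no cache, no result sets and no
-- sweep; it is the standard decidable rendering of "the dependency relation below token is
-- well-founded".  On excluded inputs Python A recurses forever (RecursionError).
-- (2) the dict arguments have no duplicate keys and the set-valued cache entries no duplicate
-- elements — automatic for every Python dict/set; such inputs denote no Python value.
def Pre_compute_token_closure (token : String) (dependency_map : List (String × String × String × Int)) (preserved_tokens : List String) (cache : List (String × List String × List Int)) : Prop :=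
  pvFrontIter dependency_map preserved_tokens cache (dependency_map.length + 1) [token] = []
  ∧ (dependency_map.map Prod.fst).Nodup
  ∧ (cache.map Prod.fst).Nodup
  ∧ ∀ e ∈ cache, e.2.1.Nodup ∧ e.2.2.Nodup

instance (token : String) (dependency_map : List (String × String × String × Int)) (preserved_tokens : List String) (cache : List (String × List String × List Int)) : Decidable (Pre_compute_token_closure token dependency_map preserved_tokens cache) := by unfold Pre_compute_token_closure; infer_instance

def pvWitness_compute_token_closure : String × (List (String × String × String × Int)) × List String × (List (String × List String × List Int)) :=
  ("ab", [("ab", "a", "b", 0)], ["c"], [("zz", ["z"], [3])])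

def Spec_compute_token_closure (token : String) (dependency_map : List (String × String × String × Int)) (preserved_tokens : List String) (cache : List (String × List String × List Int)) (out : List String × List Int) : Prop := out = compute_token_closure_alt token dependency_map preserved_tokens cache
instance (token : String) (dependency_map : List (String × String × String × Int)) (preserved_tokens : List String) (cache : List (String × List String × List Int)) (out : List String × List Int) : Decidable (Spec_compute_token_closure token dependency_map preserved_tokens cache out) := by unfold Spec_compute_token_closure; infer_instance

-- ===== CLAIM (what is proved, stated in full; the proofs are below) =====
def Claim_equal_compute_token_closure : Prop := ∀ (token : String) (dependency_map : List (String × String × String × Int)) (preserved_tokens : List String) (cache : List (String × List String × List Int)), Dom_compute_token_closure token dependency_map preserved_tokens cache → Pre_compute_token_closure token dependency_map preserved_tokens cache → Spec_compute_token_closure token dependency_map preserved_tokens cache (compute_token_closure token dependency_map preserved_tokens cache)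

-- ===== LEMMAS AND PROOFS =====

-- association-list basics
theorem pv_lookup_mem {ν : Type} (l : List (String × ν)) (k : String) (v : ν) (h : l.lookup k = some v) : (k, v) ∈ l := by
  induction l with
  | nil => simp [List.lookup] at h
  | cons e t ih =>
    obtain ⟨a, b⟩ := e
    rw [List.lookup] at h
    by_cases hk : a = k
    · subst hk; simp at h; subst h; exact List.mem_cons_self
    · rw [show (k == a) = false by simp [Ne.symm hk]] at h; exact List.mem_cons_of_mem _ (ih h)

theorem pv_mem_lookup {ν : Type} (l : List (String × ν)) (k : String) (v : ν) (h : (k, v) ∈ l) (hn : (l.map Prod.fst).Nodup) : l.lookup k = some v := by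
  induction l with
  | nil => simp at h
  | cons e t ih =>
    obtain ⟨a, b⟩ := e
    simp only [List.map_cons, List.nodup_cons] at hn
    rw [List.lookup]
    rcases List.mem_cons.mp h with h | h
    · obtain ⟨rfl, rfl⟩ := Prod.mk.injEq .. |>.mp h.symm
      simp
    · have hne : ¬ (a = k) := by rintro rfl; exact hn.1 (List.mem_map.mpr ⟨_, h, rfl⟩)
      rw [show (k == a) = false by simp [Ne.symm hne]]; exact ih h hn.2

theorem pv_nodup_length_le (l m : List String) (h : l.Nodup) (hs : ∀ x ∈ l, x ∈ m) : l.length ≤ m.length := by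
  calc l.length = l.toFinset.card := (List.toFinset_card_of_nodup h).symm
    _ ≤ m.toFinset.card := Finset.card_le_card (fun x hx => List.mem_toFinset.mpr (hs x (List.mem_toFinset.mp hx)))
    _ ≤ m.length := m.toFinset_card_le

theorem pv_insert_absent {ν : Type} (c : List (String × ν)) (k : String) (v : ν) (h : c.lookup k = none) :
    pvDictInsert c k v = c ++ [(k, v)] := by
  unfold pvDictInsert; rw [h]; rfl

-- the canonical closure value, computed purely from the ORIGINAL cache, with fuel
def pvClosF (dep : List (String × String × String × Int)) (pres : List String) (cache0 : List (String × List String × List Int)) : Nat → String → List String × List Int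
  | 0, _ => ([], [])
  | Nat.succ f, t =>
    if pres.contains t then ([], [])
    else match cache0.lookup t with
    | some (ct, cm) => (PySem.Set.ofList ct, PySem.Set.ofList cm)
    | none => match dep.lookup t with
      | none => ([t], [])
      | some (l, r, m) =>
        let L := pvClosF dep pres cache0 f l
        let R := pvClosF dep pres cache0 f r
        (PySem.Set.union (PySem.Set.union L.1 R.1) [t], PySem.Set.union (PySem.Set.union L.2 R.2) [m])

def pvCL (dep : List (String × String × String × Int)) (pres : List String) (cache0 : List (String × List String × List Int)) (t : String) : List String × List Int :=
  pvClosF dep pres cache0 (dep.length + 3) t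

-- fuel-stability above a threshold
def pvCLs (dep : List (String × String × String × Int)) (pres : List String) (cache0 : List (String × List String × List Int)) (d : Nat) (t : String) : Prop :=
  ∀ f, d ≤ f → pvClosF dep pres cache0 f t = pvClosF dep pres cache0 d t

theorem pvCLs_mono (dep : List (String × String × String × Int)) (pres : List String) (cache0 : List (String × List String × List Int)) (d d' : Nat) (t : String) (h : d ≤ d') (hs : pvCLs dep pres cache0 d t) : pvCLs dep pres cache0 d' t := by
  intro f hf; rw [hs f (le_trans h hf), hs d' h]

theorem pvCLs_settled (dep : List (String × String × String × Int)) (pres : List String) (cache0 : List (String × List String × List Int)) (t : String)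
    (h : pres.contains t = true ∨ (cache0.lookup t).isSome ∨ dep.lookup t = none) : pvCLs dep pres cache0 1 t := by
  intro f hf
  obtain ⟨f', rfl⟩ : ∃ f', f = f' + 1 := ⟨f - 1, by omega⟩
  show pvClosF dep pres cache0 (f' + 1) t = pvClosF dep pres cache0 (0 + 1) t
  simp only [pvClosF]
  cases hp : pres.contains t with
  | true => simp
  | false =>
    simp only [Bool.false_eq_true, if_false]
    cases hc : cache0.lookup t with
    | some v => rfl
    | none =>
      cases hdp : dep.lookup t with
      | some v =>
        exfalso
        rcases h with h | h | h
        · rw [hp] at h; exact Bool.false_ne_true h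
        · rw [hc] at h; exact Bool.false_ne_true h
        · rw [hdp] at h; simp at h
      | none => rfl

theorem pvClosF_nodup (dep : List (String × String × String × Int)) (pres : List String) (cache0 : List (String × List String × List Int)) (f : Nat) (t : String) :
    (pvClosF dep pres cache0 f t).1.Nodup ∧ (pvClosF dep pres cache0 f t).2.Nodup := by
  induction f generalizing t with
  | zero => exact ⟨List.nodup_nil, List.nodup_nil⟩
  | succ f ih =>
    show (pvClosF dep pres cache0 (f + 1) t).1.Nodup ∧ (pvClosF dep pres cache0 (f + 1) t).2.Nodup
    simp only [pvClosF]
    cases hp : pres.contains t with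
    | true => exact ⟨List.nodup_nil, List.nodup_nil⟩
    | false =>
      simp only [Bool.false_eq_true, if_false]
      cases hc : cache0.lookup t with
      | some v => exact ⟨PySem.Set.nodup_ofList _, PySem.Set.nodup_ofList _⟩
      | none =>
        cases hdp : dep.lookup t with
        | none => exact ⟨List.nodup_singleton _, List.nodup_nil⟩
        | some lrm =>
          exact ⟨PySem.Set.nodup_union _ _ (PySem.Set.nodup_union _ _ (ih lrm.1).1),
                 PySem.Set.nodup_union _ _ (PySem.Set.nodup_union _ _ (ih lrm.1).2)⟩

-- frontier iteration facts
theorem pvFront_nil (dep : List (String × String × String × Int)) (pres : List String) (cache0 : List (String × List String × List Int)) (n : Nat) : pvFrontIter dep pres cache0 n [] = [] := by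
  induction n with
  | zero => rfl
  | succ n ih =>
    show pvFrontIter dep pres cache0 n (pvFrontStep dep pres cache0 []) = []
    simpa [pvFrontStep] using ih

theorem pvFront_mono (dep : List (String × String × String × Int)) (pres : List String) (cache0 : List (String × List String × List Int)) (n : Nat) (F G : List String)
    (h : ∀ x ∈ F, x ∈ G) : ∀ x ∈ pvFrontIter dep pres cache0 n F, x ∈ pvFrontIter dep pres cache0 n G := by
  induction n generalizing F G with
  | zero => exact h
  | succ n ih =>
    show ∀ x ∈ pvFrontIter dep pres cache0 n (pvFrontStep dep pres cache0 F), x ∈ pvFrontIter dep pres cache0 n (pvFrontStep dep pres cache0 G)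
    apply ih
    intro x hx
    simp only [pvFrontStep, List.mem_dedup, List.mem_flatMap] at hx ⊢
    obtain ⟨y, hyF, hxy⟩ := hx
    exact ⟨y, h y hyF, hxy⟩

theorem pvFront_add (dep : List (String × String × String × Int)) (pres : List String) (cache0 : List (String × List String × List Int)) (a b : Nat) (F : List String) :
    pvFrontIter dep pres cache0 (a + b) F = pvFrontIter dep pres cache0 b (pvFrontIter dep pres cache0 a F) := by
  induction a generalizing F with
  | zero => rw [Nat.zero_add]; rfl
  | succ a ih =>
    rw [show a + 1 + b = (a + b) + 1 by omega]
    show pvFrontIter dep pres cache0 (a + b) (pvFrontStep dep pres cache0 F) = _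
    rw [ih]
    rfl

theorem pvFront_dead (dep : List (String × String × String × Int)) (pres : List String) (cache0 : List (String × List String × List Int)) (d j : Nat) (F : List String)
    (h : pvFrontIter dep pres cache0 d F = []) (hj : d ≤ j) : pvFrontIter dep pres cache0 j F = [] := by
  rw [show j = d + (j - d) by omega, pvFront_add, h, pvFront_nil]

theorem pvFront_child (dep : List (String × String × String × Int)) (pres : List String) (cache0 : List (String × List String × List Int)) (t x : String) (n : Nat)
    (hx : x ∈ pvNbrs dep pres cache0 t) : ∀ y ∈ pvFrontIter dep pres cache0 n [x], y ∈ pvFrontIter dep pres cache0 (n + 1) [t] := by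
  show ∀ y ∈ pvFrontIter dep pres cache0 n [x], y ∈ pvFrontIter dep pres cache0 n (pvFrontStep dep pres cache0 [t])
  apply pvFront_mono
  intro z hz
  simp only [List.mem_singleton] at hz
  subst hz
  simp only [pvFrontStep, List.mem_dedup, List.mem_flatMap]
  exact ⟨t, List.mem_singleton.mpr rfl, hx⟩

-- no self-reach under a dead frontier: t ∈ pvFrontIter (k+1) [t] contradicts pvFrontIter d [t] = []
theorem pvFront_no_cycle (dep : List (String × String × String × Int)) (pres : List String) (cache0 : List (String × List String × List Int)) (t : String) (d k : Nat)
    (hd : pvFrontIter dep pres cache0 d [t] = []) (hk : t ∈ pvFrontIter dep pres cache0 (k + 1) [t]) : False := by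
  have pump : ∀ m, t ∈ pvFrontIter dep pres cache0 ((m + 1) * (k + 1)) [t] := by
    intro m
    induction m with
    | zero => simpa using hk
    | succ m ih =>
      rw [show (m + 1 + 1) * (k + 1) = (m + 1) * (k + 1) + (k + 1) by ring, pvFront_add]
      refine pvFront_mono dep pres cache0 (k + 1) [t] _ ?_ t hk
      intro z hz
      simp only [List.mem_singleton] at hz
      subst hz
      exact ih
  have hdied : pvFrontIter dep pres cache0 ((d + 1) * (k + 1)) [t] = [] :=
    pvFront_dead dep pres cache0 d _ [t] hd (by nlinarith)
  have hmem := pump d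
  rw [hdied] at hmem
  simp at hmem

-- the cache invariant: the original cache plus correct closure entries
def pvNInt (dep : List (String × String × String × Int)) (news : List (String × List String × List Int)) : Nat :=
  (news.filter (fun e => (dep.lookup e.1).isSome)).length

def pvGoodNews (dep : List (String × String × String × Int)) (pres : List String) (cache0 news : List (String × List String × List Int)) : Prop :=
  (news.map Prod.fst).Nodup ∧
  ∀ e ∈ news, cache0.lookup e.1 = none ∧ pres.contains e.1 = false ∧
    e.2 = pvCL dep pres cache0 e.1 ∧ pvCLs dep pres cache0 (pvNInt dep news + 1) e.1

def pvGood (dep : List (String × String × String × Int)) (pres : List String) (cache0 c : List (String × List String × List Int)) : Prop :=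
  ∃ news, c = cache0 ++ news ∧ pvGoodNews dep pres cache0 news

theorem pvGood_init (dep : List (String × String × String × Int)) (pres : List String) (cache0 : List (String × List String × List Int)) : pvGood dep pres cache0 cache0 :=
  ⟨[], by simp, by simp, by simp⟩

theorem pvNInt_le (dep : List (String × String × String × Int)) (pres : List String) (cache0 news : List (String × List String × List Int))
    (h : pvGoodNews dep pres cache0 news) : pvNInt dep news ≤ dep.length := by
  have hsub : (news.filter (fun e => (dep.lookup e.1).isSome)).Sublist news := List.filter_sublist
  have hnd : ((news.filter (fun e => (dep.lookup e.1).isSome)).map Prod.fst).Nodup :=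
    (hsub.map Prod.fst).nodup h.1
  have hlen : pvNInt dep news = ((news.filter (fun e => (dep.lookup e.1).isSome)).map Prod.fst).length := by
    simp [pvNInt]
  rw [hlen, show dep.length = (dep.map Prod.fst).length by simp]
  apply pv_nodup_length_le _ _ hnd
  intro x hx
  simp only [List.mem_map] at hx
  obtain ⟨e, he, rfl⟩ := hx
  have hps : (dep.lookup e.1).isSome = true := by simpa using List.of_mem_filter he
  obtain ⟨v, hv⟩ := Option.isSome_iff_exists.mp hps
  exact List.mem_map.mpr ⟨(e.1, v), pv_lookup_mem _ _ _ hv, rfl⟩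

-- what a lookup in a good cache yields
theorem pvGood_lookup (dep : List (String × String × String × Int)) (pres : List String) (cache0 c : List (String × List String × List Int)) (x : String) (v : List String × List Int)
    (hG : pvGood dep pres cache0 c) (h : c.lookup x = some v) :
    cache0.lookup x = some v ∨ (cache0.lookup x = none ∧ pres.contains x = false ∧ v = pvCL dep pres cache0 x ∧ pvCLs dep pres cache0 (dep.length + 1) x) := by
  obtain ⟨news, rfl, hN⟩ := hG
  rw [List.lookup_append] at h
  cases hc : cache0.lookup x with
  | some w => left; rw [hc, Option.some_or] at h; exact h
  | none =>
    right
    rw [hc, Option.none_or] at h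
    obtain ⟨h0, hp, hv', hs⟩ := hN.2 (x, v) (pv_lookup_mem _ _ _ h)
    exact ⟨rfl, hp, hv', pvCLs_mono _ _ _ _ _ _ (by have := pvNInt_le dep pres cache0 news hN; omega) hs⟩

theorem pvGood_lookup_none (dep : List (String × String × String × Int)) (pres : List String) (cache0 c : List (String × List String × List Int)) (x : String)
    (hG : pvGood dep pres cache0 c) (h : c.lookup x = none) : cache0.lookup x = none := by
  obtain ⟨news, rfl, hN⟩ := hG
  rw [List.lookup_append] at h
  cases hc : cache0.lookup x with
  | some w => rw [hc] at h; simp at h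
  | none => rfl

theorem pvGood_cache0 (dep : List (String × String × String × Int)) (pres : List String) (cache0 c : List (String × List String × List Int)) (x : String) (v : List String × List Int)
    (hG : pvGood dep pres cache0 c) (h : cache0.lookup x = some v) : c.lookup x = some v := by
  obtain ⟨news, rfl, hN⟩ := hG
  rw [List.lookup_append, h]
  rfl

-- value of a good lookup as the stable closure (needs the Pre_ nodup facts to drop set() copies)
-- (hcv : original cache set values are duplicate-free)
def pvPreVals (cache0 : List (String × List String × List Int)) : Prop := ∀ e ∈ cache0, e.2.1.Nodup ∧ e.2.2.Nodup


-- more lookup facts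
theorem pv_lookup_some_of_mem_keys {ν : Type} (l : List (String × ν)) (k : String) (h : k ∈ l.map Prod.fst) : (l.lookup k).isSome := by
  induction l with
  | nil => simp at h
  | cons e t ih =>
    rw [List.lookup]
    by_cases hk : e.1 = k
    · simp [hk]
    · rw [show (k == e.1) = false by simp [Ne.symm hk]]
      apply ih
      simp only [List.map_cons, List.mem_cons] at h
      exact h.resolve_left (fun hh => hk hh.symm)

theorem pv_lookup_single {ν : Type} (t x : String) (v : ν) : List.lookup x [(t, v)] = if t = x then some v else none := by
  rw [List.lookup]
  by_cases h : t = x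
  · simp [h]
  · rw [show (x == t) = false by simp [Ne.symm h], if_neg h]; rfl

-- evaluation of pvClosF at successor fuel
theorem pvClosF_succ_pres (dep : List (String × String × String × Int)) (pres : List String) (cache0 : List (String × List String × List Int)) (f : Nat) (t : String)
    (hp : pres.contains t = true) : pvClosF dep pres cache0 (f + 1) t = ([], []) := by
  have hp' : t ∈ pres := by simpa using hp
  simp [pvClosF, hp']

theorem pvClosF_succ_cached (dep : List (String × String × String × Int)) (pres : List String) (cache0 : List (String × List String × List Int)) (f : Nat) (t : String) (ct : List String) (cm : List Int)
    (hp : pres.contains t = false) (hc : cache0.lookup t = some (ct, cm)) :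
    pvClosF dep pres cache0 (f + 1) t = (PySem.Set.ofList ct, PySem.Set.ofList cm) := by
  have hp' : t ∉ pres := by simpa using hp
  simp [pvClosF, hp', hc]

theorem pvClosF_succ_leaf (dep : List (String × String × String × Int)) (pres : List String) (cache0 : List (String × List String × List Int)) (f : Nat) (t : String)
    (hp : pres.contains t = false) (hc : cache0.lookup t = none) (hd : dep.lookup t = none) :
    pvClosF dep pres cache0 (f + 1) t = ([t], []) := by
  have hp' : t ∉ pres := by simpa using hp
  simp [pvClosF, hp', hc, hd]

theorem pvClosF_succ_node (dep : List (String × String × String × Int)) (pres : List String) (cache0 : List (String × List String × List Int)) (f : Nat) (t l r : String) (m : Int)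
    (hp : pres.contains t = false) (hc : cache0.lookup t = none) (hd : dep.lookup t = some (l, r, m)) :
    pvClosF dep pres cache0 (f + 1) t =
      (PySem.Set.union (PySem.Set.union (pvClosF dep pres cache0 f l).1 (pvClosF dep pres cache0 f r).1) [t],
       PySem.Set.union (PySem.Set.union (pvClosF dep pres cache0 f l).2 (pvClosF dep pres cache0 f r).2) [m]) := by
  have hp' : t ∉ pres := by simpa using hp
  simp [pvClosF, hp', hc, hd]

theorem pvCL_ofList (dep : List (String × String × String × Int)) (pres : List String) (cache0 : List (String × List String × List Int)) (t : String) :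
    (PySem.Set.ofList (pvCL dep pres cache0 t).1, PySem.Set.ofList (pvCL dep pres cache0 t).2) = pvCL dep pres cache0 t := by
  obtain ⟨h1, h2⟩ := pvClosF_nodup dep pres cache0 (dep.length + 3) t
  unfold pvCL
  rw [PySem.Set.ofList_eq_self_of_nodup _ h1, PySem.Set.ofList_eq_self_of_nodup _ h2]

theorem pvNInt_append (dep : List (String × String × String × Int)) (news : List (String × List String × List Int)) (e : String × List String × List Int) :
    pvNInt dep (news ++ [e]) = pvNInt dep news + (if (dep.lookup e.1).isSome then 1 else 0) := by
  simp only [pvNInt, List.filter_append]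
  by_cases h : (dep.lookup e.1).isSome
  · simp [h]
  · simp [Bool.eq_false_iff.mpr h, h]

-- appending a correct new entry keeps the cache good
theorem pvGood_extend (dep : List (String × String × String × Int)) (pres : List String) (cache0 c : List (String × List String × List Int)) (t : String) (v : List String × List Int)
    (hG : pvGood dep pres cache0 c) (hnone : c.lookup t = none) (hp : pres.contains t = false)
    (hval : v = pvCL dep pres cache0 t)
    (hstab : ∀ news, c = cache0 ++ news → pvGoodNews dep pres cache0 news → pvCLs dep pres cache0 (pvNInt dep (news ++ [(t, v)]) + 1) t) :
    pvGood dep pres cache0 (c ++ [(t, v)]) := by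
  obtain ⟨news, rfl, hN⟩ := hG
  have hc0 : cache0.lookup t = none := pvGood_lookup_none dep pres cache0 _ t ⟨news, rfl, hN⟩ hnone
  have hnews : news.lookup t = none := by
    rw [List.lookup_append, hc0, Option.none_or] at hnone; exact hnone
  have hnotmem : t ∉ news.map Prod.fst := by
    intro hmem
    have := pv_lookup_some_of_mem_keys news t hmem
    rw [hnews] at this; simp at this
  refine ⟨news ++ [(t, v)], by simp, ?_, ?_⟩
  · simp only [List.map_append, List.map_cons, List.map_nil]
    refine List.nodup_append.mpr ⟨hN.1, List.nodup_singleton _, ?_⟩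
    intro a ha b hb
    rw [List.mem_singleton] at hb
    subst hb
    exact fun heq => hnotmem (heq ▸ ha)
  · intro e he
    rcases List.mem_append.mp he with he | he
    · obtain ⟨h1, h2, h3, h4⟩ := hN.2 e he
      refine ⟨h1, h2, h3, pvCLs_mono _ _ _ _ _ _ ?_ h4⟩
      rw [pvNInt_append]; omega
    · simp only [List.mem_singleton] at he
      subst he
      exact ⟨hc0, hp, hval, hstab news rfl hN⟩

theorem pvGood_extend_lookups (c : List (String × List String × List Int)) (t : String) (v : List String × List Int) (hnone : c.lookup t = none) :
    ((c ++ [(t, v)]).lookup t = some v) ∧ (∀ x w, c.lookup x = some w → (c ++ [(t, v)]).lookup x = some w) := by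
  constructor
  · rw [List.lookup_append, hnone, Option.none_or, pv_lookup_single, if_pos rfl]
  · intro x w h
    rw [List.lookup_append, h]; rfl

-- ====== A side ======

def pvAOK (dep : List (String × String × String × Int)) (pres : List String) (cache0 : List (String × List String × List Int)) (t : String) (c : List (String × List String × List Int)) (f : Nat) : Prop :=
  ∃ c', pvAuxA dep pres f t c = some (pvCL dep pres cache0 t, c') ∧ pvGood dep pres cache0 c' ∧
    (pres.contains t = true ∨ (c'.lookup t).isSome) ∧
    (∀ x v, c.lookup x = some v → c'.lookup x = some v) ∧
    (∀ x, c.lookup x = none → (c'.lookup x).isSome → (dep.lookup x = none ∨ ∃ k, x ∈ pvFrontIter dep pres cache0 k [t]))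

theorem pvA_settled (dep : List (String × String × String × Int)) (pres : List String) (cache0 : List (String × List String × List Int)) (t : String) (c : List (String × List String × List Int)) (f : Nat)
    (h : pres.contains t = true ∨ (c.lookup t).isSome ∨ dep.lookup t = none)
    (hG : pvGood dep pres cache0 c) : pvAOK dep pres cache0 t c (f + 1) := by
  by_cases hp : pres.contains t = true
  · refine ⟨c, ?_, hG, Or.inl hp, fun x v h => h, fun x h1 h2 => by rw [h1] at h2; simp at h2⟩
    have hv' : pvCL dep pres cache0 t = ([], []) := pvClosF_succ_pres dep pres cache0 _ t hp
    have hp' : t ∈ pres := by simpa using hp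
    simp [pvAuxA, hp', hv']
  · replace hp : pres.contains t = false := Bool.eq_false_iff.mpr hp
    cases hcl : c.lookup t with
    | some p =>
      obtain ⟨ct, cm⟩ := p
      have hval : (PySem.Set.ofList ct, PySem.Set.ofList cm) = pvCL dep pres cache0 t := by
        rcases pvGood_lookup dep pres cache0 c t (ct, cm) hG hcl with hc0 | ⟨hc0, -, hv', -⟩
        · exact (pvClosF_succ_cached dep pres cache0 _ t ct cm hp hc0).symm
        · rw [show ct = (pvCL dep pres cache0 t).1 by rw [← hv'], show cm = (pvCL dep pres cache0 t).2 by rw [← hv']]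
          exact pvCL_ofList dep pres cache0 t
      refine ⟨c, ?_, hG, Or.inr (by simp [hcl]), fun x v h => h, fun x h1 h2 => by rw [h1] at h2; simp at h2⟩
      have hp' : t ∉ pres := by simpa using hp
      simp [pvAuxA, hp', hcl, hval]
    | none =>
      cases hdl : dep.lookup t with
      | some lrm =>
        exfalso
        rcases h with h | h | h
        · rw [hp] at h; exact Bool.false_ne_true h
        · rw [hcl] at h; simp at h
        · rw [hdl] at h; simp at h
      | none =>
        have hc0 : cache0.lookup t = none := pvGood_lookup_none dep pres cache0 c t hG hcl
        have hval : pvCL dep pres cache0 t = ([t], []) := pvClosF_succ_leaf dep pres cache0 _ t hp hc0 hdl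
        have hins : pvDictInsert c t (PySem.Set.ofList [t], (PySem.Set.ofList ([] : List Int))) = c ++ [(t, (([t], []) : List String × List Int))] := by
          rw [show (PySem.Set.ofList [t]) = [t] from PySem.Set.ofList_eq_self_of_nodup _ (List.nodup_singleton t)]
          exact pv_insert_absent c t _ hcl
        obtain ⟨hlk, hmono⟩ := pvGood_extend_lookups c t (([t], []) : List String × List Int) hcl
        refine ⟨c ++ [(t, ([t], []))], ?_, ?_, Or.inr (by simp [hlk]), hmono, ?_⟩
        · have hp' : t ∉ pres := by simpa using hp
          simp only [pvAuxA, hcl, hdl, hins, hval, if_neg (show ¬ (pres.contains t = true) by simp [hp'])]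
        · refine pvGood_extend dep pres cache0 c t _ hG hcl hp hval.symm ?_
          intro news hc hN
          exact pvCLs_mono _ _ _ _ _ _ (by omega) (pvCLs_settled dep pres cache0 t (Or.inr (Or.inr hdl)))
        · intro x h1 h2
          rcases hx : (c ++ [(t, ([t], []))]).lookup x with hv | hv
          · rw [hx] at h2; simp at h2
          · rw [List.lookup_append, h1, Option.none_or, pv_lookup_single] at hx
            by_cases hxt : t = x
            · subst hxt; exact Or.inl hdl
            · rw [if_neg hxt] at hx; simp at hx

theorem pvNbrs_settled (dep : List (String × String × String × Int)) (pres : List String) (cache0 : List (String × List String × List Int)) (x : String)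
    (h : pres.contains x = true ∨ (cache0.lookup x).isSome = true ∨ dep.lookup x = none) : pvNbrs dep pres cache0 x = [] := by
  unfold pvNbrs
  rcases h with h | h | h
  · rw [if_pos (by rw [h, Bool.true_or])]
  · rw [if_pos (by rw [h, Bool.or_true])]
  · by_cases hg : (pres.contains x || (cache0.lookup x).isSome) = true
    · rw [if_pos hg]
    · rw [if_neg hg, h]

theorem pvFront_settled (dep : List (String × String × String × Int)) (pres : List String) (cache0 : List (String × List String × List Int)) (x : String) (k : Nat)
    (h : pres.contains x = true ∨ (cache0.lookup x).isSome = true ∨ dep.lookup x = none) : pvFrontIter dep pres cache0 (k + 1) [x] = [] := by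
  show pvFrontIter dep pres cache0 k (pvFrontStep dep pres cache0 [x]) = []
  rw [show pvFrontStep dep pres cache0 [x] = [] by simp [pvFrontStep, pvNbrs_settled dep pres cache0 x h], pvFront_nil]

theorem pvNbrs_mem (dep : List (String × String × String × Int)) (pres : List String) (cache0 : List (String × List String × List Int)) (t l r x : String) (m : Int)
    (hp : pres.contains t = false) (hc : cache0.lookup t = none) (hd : dep.lookup t = some (l, r, m))
    (hx : x = l ∨ x = r) (hxp : pres.contains x = false) (hxc : cache0.lookup x = none) (hxd : (dep.lookup x).isSome) :
    x ∈ pvNbrs dep pres cache0 t := by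
  unfold pvNbrs
  rw [if_neg (by rw [hp, hc]; simp), hd]
  rw [List.mem_filter]
  constructor
  · rcases hx with rfl | rfl <;> simp
  · rw [hxp, hxc]
    simpa using hxd

-- a child of the call either contributes via the frontier or is settled at depth 0
theorem pvLift (dep : List (String × String × String × Int)) (pres : List String) (cache0 : List (String × List String × List Int)) (t child x : String) (c' : List (String × List String × List Int))
    (hG' : pvGood dep pres cache0 c')
    (hxc0 : cache0.lookup x = none) (hxc' : (c'.lookup x).isSome)
    (hdx : (dep.lookup x).isSome)
    (hch : child ∈ pvNbrs dep pres cache0 t ∨ (pres.contains child = true ∨ (cache0.lookup child).isSome = true ∨ dep.lookup child = none))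
    (hk : ∃ k, x ∈ pvFrontIter dep pres cache0 k [child]) :
    ∃ k, x ∈ pvFrontIter dep pres cache0 (k + 1) [t] := by
  obtain ⟨k, hkm⟩ := hk
  rcases hch with hch | hsettled
  · exact ⟨k, pvFront_child dep pres cache0 t child k hch x hkm⟩
  · exfalso
    cases k with
    | zero =>
      simp only [pvFrontIter, List.mem_singleton] at hkm
      subst hkm
      -- x itself settled: pres impossible (x is a good new entry), cache0 impossible, dep none impossible
      obtain ⟨v, hv'⟩ := Option.isSome_iff_exists.mp hxc'
      rcases pvGood_lookup dep pres cache0 c' x v hG' hv' with hcc | ⟨-, hxp, -, -⟩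
      · rw [hxc0] at hcc; simp at hcc
      · rcases hsettled with hs | hs | hs
        · rw [hxp] at hs; exact Bool.false_ne_true hs
        · rw [hxc0] at hs; simp at hs
        · rw [hs] at hdx; simp at hdx
    | succ k' =>
      rw [pvFront_settled dep pres cache0 child k' hsettled] at hkm
      simp at hkm

-- stability of any resolved token at the exact counting threshold
theorem pvChild_CLs (dep : List (String × String × String × Int)) (pres : List String) (cache0 news : List (String × List String × List Int)) (x : String)
    (hN : pvGoodNews dep pres cache0 news)
    (hx : pres.contains x = true ∨ dep.lookup x = none ∨ (((cache0 ++ news).lookup x).isSome = true)) :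
    pvCLs dep pres cache0 (pvNInt dep news + 1) x := by
  rcases hx with hx | hx | hx
  · exact pvCLs_mono _ _ _ _ _ _ (by omega) (pvCLs_settled dep pres cache0 x (Or.inl hx))
  · exact pvCLs_mono _ _ _ _ _ _ (by omega) (pvCLs_settled dep pres cache0 x (Or.inr (Or.inr hx)))
  · obtain ⟨v, hv'⟩ := Option.isSome_iff_exists.mp hx
    rw [List.lookup_append] at hv'
    cases hc : cache0.lookup x with
    | some w => exact pvCLs_mono _ _ _ _ _ _ (by omega) (pvCLs_settled dep pres cache0 x (Or.inr (Or.inl (by simp [hc]))))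
    | none =>
      rw [hc, Option.none_or] at hv'
      exact (hN.2 (x, v) (pv_lookup_mem _ _ _ hv')).2.2.2

theorem pvA_main (dep : List (String × String × String × Int)) (pres : List String) (cache0 : List (String × List String × List Int))
    (hv : pvPreVals cache0) :
    ∀ (d : Nat) (t : String) (c : List (String × List String × List Int)) (f : Nat),
      pvFrontIter dep pres cache0 d [t] = [] → d ≤ dep.length + 1 → d < f →
      pvGood dep pres cache0 c → pvAOK dep pres cache0 t c f := by
  intro d
  induction d with
  | zero =>
    intro t c f hd hdL hf hG
    simp [pvFrontIter] at hd
  | succ e ih =>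
    intro t c f hd hdL hf hG
    by_cases hsettled : pres.contains t = true ∨ (c.lookup t).isSome = true ∨ dep.lookup t = none
    · obtain ⟨f', rfl⟩ : ∃ f', f = f' + 1 := ⟨f - 1, by omega⟩
      exact pvA_settled dep pres cache0 t c f' hsettled hG
    · push_neg at hsettled
      obtain ⟨hp', hcl', hdl'⟩ := hsettled
      have hp : pres.contains t = false := by simpa using hp'
      have hcl : c.lookup t = none := by
        cases hx : c.lookup t with
        | some w => exact absurd (by simp [hx]) hcl'
        | none => rfl
      obtain ⟨lrm, hdl⟩ := Option.ne_none_iff_exists'.mp hdl'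
      obtain ⟨l, r, m⟩ := lrm
      have hc0 : cache0.lookup t = none := pvGood_lookup_none dep pres cache0 c t hG hcl
      obtain ⟨f', rfl⟩ : ∃ f', f = f' + 1 := ⟨f - 1, by omega⟩
      have hf' : e < f' := by omega
      have hchild : ∀ x, (x = l ∨ x = r) →
          (pres.contains x = true ∨ (cache0.lookup x).isSome = true ∨ dep.lookup x = none) ∨
          (x ∈ pvNbrs dep pres cache0 t ∧ pvFrontIter dep pres cache0 e [x] = []) := by
        intro x hx
        by_cases hs : pres.contains x = true ∨ (cache0.lookup x).isSome = true ∨ dep.lookup x = none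
        · exact Or.inl hs
        · push_neg at hs
          obtain ⟨hxp', hxc', hxd'⟩ := hs
          have hxp : pres.contains x = false := by simpa using hxp'
          have hxc : cache0.lookup x = none := by
            cases hxx : cache0.lookup x with
            | some w => exact absurd (by simp [hxx]) hxc'
            | none => rfl
          have hxd : (dep.lookup x).isSome := Option.ne_none_iff_isSome.mp hxd'
          have hnb := pvNbrs_mem dep pres cache0 t l r x m hp hc0 hdl hx hxp hxc hxd
          refine Or.inr ⟨hnb, List.eq_nil_iff_forall_not_mem.mpr ?_⟩
          intro y hy
          have hyy := pvFront_child dep pres cache0 t x e hnb y hy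
          rw [hd] at hyy
          simp at hyy
      have hcallgen : ∀ x, (x = l ∨ x = r) → ∀ cc, pvGood dep pres cache0 cc → pvAOK dep pres cache0 x cc f' := by
        intro x hx cc hGc
        rcases hchild x hx with hs | ⟨hnb, hdx⟩
        · have hsc : pres.contains x = true ∨ (cc.lookup x).isSome = true ∨ dep.lookup x = none := by
            rcases hs with h | h | h
            · exact Or.inl h
            · obtain ⟨w, hw⟩ := Option.isSome_iff_exists.mp h
              exact Or.inr (Or.inl (by rw [pvGood_cache0 dep pres cache0 cc x w hGc hw]; rfl))
            · exact Or.inr (Or.inr h)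
          obtain ⟨f'', rfl⟩ : ∃ f'', f' = f'' + 1 := ⟨f' - 1, by omega⟩
          exact pvA_settled dep pres cache0 x cc f'' hsc hGc
        · exact ih x cc f' hdx (by omega) hf' hGc
      obtain ⟨c1, heq1, hG1, hin1, hmono1, hnew1⟩ := hcallgen l (Or.inl rfl) c hG
      obtain ⟨c2, heq2, hG2, hin2, hmono2, hnew2⟩ := hcallgen r (Or.inr rfl) c1 hG1
      have hchl : (l ∈ pvNbrs dep pres cache0 t ∨ (pres.contains l = true ∨ (cache0.lookup l).isSome = true ∨ dep.lookup l = none)) := by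
        rcases hchild l (Or.inl rfl) with h | ⟨h, _⟩
        · exact Or.inr h
        · exact Or.inl h
      have hchr : (r ∈ pvNbrs dep pres cache0 t ∨ (pres.contains r = true ∨ (cache0.lookup r).isSome = true ∨ dep.lookup r = none)) := by
        rcases hchild r (Or.inr rfl) with h | ⟨h, _⟩
        · exact Or.inr h
        · exact Or.inl h
      have hcupl : pres.contains l = true ∨ dep.lookup l = none ∨ (c2.lookup l).isSome = true := by
        rcases hin1 with h | h
        · exact Or.inl h
        · obtain ⟨w, hw⟩ := Option.isSome_iff_exists.mp h
          exact Or.inr (Or.inr (by rw [hmono2 l w hw]; rfl))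
      have hcupr : pres.contains r = true ∨ dep.lookup r = none ∨ (c2.lookup r).isSome = true := by
        rcases hin2 with h | h
        · exact Or.inl h
        · exact Or.inr (Or.inr h)
      have hCLl : pvCLs dep pres cache0 (dep.length + 2) l := by
        obtain ⟨news2, hc2eq, hN2⟩ := hG2
        refine pvCLs_mono _ _ _ _ _ _ (by have := pvNInt_le dep pres cache0 news2 hN2; omega)
          (pvChild_CLs dep pres cache0 news2 l hN2 ?_)
        rw [← hc2eq]; exact hcupl
      have hCLr : pvCLs dep pres cache0 (dep.length + 2) r := by
        obtain ⟨news2, hc2eq, hN2⟩ := hG2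
        refine pvCLs_mono _ _ _ _ _ _ (by have := pvNInt_le dep pres cache0 news2 hN2; omega)
          (pvChild_CLs dep pres cache0 news2 r hN2 ?_)
        rw [← hc2eq]; exact hcupr
      have hvalT : pvCL dep pres cache0 t =
          (PySem.Set.union (PySem.Set.union (pvCL dep pres cache0 l).1 (pvCL dep pres cache0 r).1) [t],
           PySem.Set.union (PySem.Set.union (pvCL dep pres cache0 l).2 (pvCL dep pres cache0 r).2) [m]) := by
        have hl2 : pvCL dep pres cache0 l = pvClosF dep pres cache0 (dep.length + 2) l := hCLl (dep.length + 3) (by omega)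
        have hr2 : pvCL dep pres cache0 r = pvClosF dep pres cache0 (dep.length + 2) r := hCLr (dep.length + 3) (by omega)
        rw [show pvCL dep pres cache0 t = pvClosF dep pres cache0 ((dep.length + 2) + 1) t from rfl,
            pvClosF_succ_node dep pres cache0 (dep.length + 2) t l r m hp hc0 hdl, hl2, hr2]
      have hclt2 : c2.lookup t = none := by
        cases hx1 : c1.lookup t with
        | some w =>
          exfalso
          rcases hnew1 t hcl (by simp [hx1]) with hdn | hkk
          · rw [hdl] at hdn; simp at hdn
          · obtain ⟨k, hk2⟩ := pvLift dep pres cache0 t l t c1 hG1 hc0 (by simp [hx1]) (by simp [hdl]) hchl hkk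
            exact pvFront_no_cycle dep pres cache0 t (e + 1) k hd hk2
        | none =>
          cases hx2 : c2.lookup t with
          | some w =>
            exfalso
            rcases hnew2 t hx1 (by simp [hx2]) with hdn | hkk
            · rw [hdl] at hdn; simp at hdn
            · obtain ⟨k, hk2⟩ := pvLift dep pres cache0 t r t c2 hG2 hc0 (by simp [hx2]) (by simp [hdl]) hchr hkk
              exact pvFront_no_cycle dep pres cache0 t (e + 1) k hd hk2
          | none => rfl
      obtain ⟨plT, plM, hpl⟩ : ∃ a b, pvCL dep pres cache0 l = (a, b) := ⟨_, _, rfl⟩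
      obtain ⟨prT, prM, hpr⟩ : ∃ a b, pvCL dep pres cache0 r = (a, b) := ⟨_, _, rfl⟩
      rw [hpl] at heq1
      rw [hpr] at heq2
      rw [hpl, hpr] at hvalT
      have hstore : (PySem.Set.ofList (PySem.Set.union (PySem.Set.union plT prT) [t]),
                     PySem.Set.ofList (PySem.Set.union (PySem.Set.union plM prM) [m])) = pvCL dep pres cache0 t := by
        rw [show PySem.Set.union (PySem.Set.union plT prT) [t] = (pvCL dep pres cache0 t).1 by rw [hvalT],
            show PySem.Set.union (PySem.Set.union plM prM) [m] = (pvCL dep pres cache0 t).2 by rw [hvalT]]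
        exact pvCL_ofList dep pres cache0 t
      have hins : pvDictInsert c2 t (PySem.Set.ofList (PySem.Set.union (PySem.Set.union plT prT) [t]),
                     PySem.Set.ofList (PySem.Set.union (PySem.Set.union plM prM) [m])) = c2 ++ [(t, pvCL dep pres cache0 t)] := by
        rw [hstore]
        exact pv_insert_absent c2 t _ hclt2
      obtain ⟨hlk3, hmono3⟩ := pvGood_extend_lookups c2 t (pvCL dep pres cache0 t) hclt2
      refine ⟨c2 ++ [(t, pvCL dep pres cache0 t)], ?_, ?_, Or.inr (by simp [hlk3]), ?_, ?_⟩
      · have hp2 : ¬ (pres.contains t = true) := by rw [hp]; exact Bool.false_ne_true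
        simp only [pvAuxA, if_neg hp2, hcl, hdl, heq1, heq2, hins, hvalT]
      · refine pvGood_extend dep pres cache0 c2 t _ hG2 hclt2 hp rfl ?_
        intro news hceq hN
        rw [pvNInt_append, show (dep.lookup t).isSome = true by simp [hdl], if_pos rfl]
        have hCl : pvCLs dep pres cache0 (pvNInt dep news + 1) l :=
          pvChild_CLs dep pres cache0 news l hN (by rw [← hceq]; exact hcupl)
        have hCr : pvCLs dep pres cache0 (pvNInt dep news + 1) r :=
          pvChild_CLs dep pres cache0 news r hN (by rw [← hceq]; exact hcupr)
        intro g hg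
        obtain ⟨g', rfl⟩ : ∃ g', g = g' + 1 := ⟨g - 1, by omega⟩
        rw [show pvNInt dep news + 1 + 1 = (pvNInt dep news + 1) + 1 from rfl,
            pvClosF_succ_node dep pres cache0 g' t l r m hp hc0 hdl,
            pvClosF_succ_node dep pres cache0 (pvNInt dep news + 1) t l r m hp hc0 hdl,
            hCl g' (by omega), hCr g' (by omega)]
      · exact fun x v h => hmono3 x v (hmono2 x v (hmono1 x v h))
      · intro x hx0 hx3
        by_cases hdx : dep.lookup x = none
        · exact Or.inl hdx
        · right
          have hxc0 : cache0.lookup x = none := pvGood_lookup_none dep pres cache0 c x hG hx0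
          by_cases hxt : x = t
          · subst hxt; exact ⟨0, by simp [pvFrontIter]⟩
          · have hx2 : (c2.lookup x).isSome := by
              obtain ⟨w, hw⟩ := Option.isSome_iff_exists.mp hx3
              rw [List.lookup_append] at hw
              cases hxx : c2.lookup x with
              | some u => simp [hxx]
              | none =>
                rw [hxx, Option.none_or, pv_lookup_single, if_neg (fun hh => hxt hh.symm)] at hw
                simp at hw
            cases hx1 : c1.lookup x with
            | some w =>
              rcases hnew1 x hx0 (by simp [hx1]) with hdn | hkk
              · exact absurd hdn hdx
              · obtain ⟨k, hk2⟩ := pvLift dep pres cache0 t l x c1 hG1 hxc0 (by simp [hx1]) (Option.ne_none_iff_isSome.mp hdx) hchl hkk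
                exact ⟨k + 1, hk2⟩
            | none =>
              rcases hnew2 x hx1 hx2 with hdn | hkk
              · exact absurd hdn hdx
              · obtain ⟨k, hk2⟩ := pvLift dep pres cache0 t r x c2 hG2 hxc0 hx2 (Option.ne_none_iff_isSome.mp hdx) hchr hkk
                exact ⟨k + 1, hk2⟩

-- ====== B side ======

theorem pvSweepStep_mono (dep : List (String × String × String × Int)) (pres : List String) (c : List (String × List String × List Int)) (e : String × String × String × Int) (x : String) (v : List String × List Int)
    (h : c.lookup x = some v) : (pvSweepStep dep pres c e).lookup x = some v := by
  unfold pvSweepStep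
  by_cases h1 : ((c.lookup e.1).isSome || pres.contains e.1) = true
  · rw [if_pos h1]; exact h
  · rw [if_neg h1]
    by_cases h2 : (pvResolved dep pres c e.2.1 && pvResolved dep pres c e.2.2.1) = true
    · rw [if_pos h2]
      have hnone : c.lookup e.1 = none := by
        have := (Bool.or_eq_false_iff.mp (Bool.eq_false_iff.mpr h1)).1
        cases hx : c.lookup e.1 with
        | some w => rw [hx] at this; simp at this
        | none => rfl
      show (pvDictInsert c e.1 _).lookup x = some v
      rw [pv_insert_absent c e.1 _ hnone, List.lookup_append, h]
      rfl
    · rw [if_neg h2]; exact h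

theorem pvResolved_mono (dep : List (String × String × String × Int)) (pres : List String) (c : List (String × List String × List Int)) (e : String × String × String × Int) (x : String)
    (h : pvResolved dep pres c x = true) : pvResolved dep pres (pvSweepStep dep pres c e) x = true := by
  unfold pvResolved at h ⊢
  rcases Bool.or_eq_true_iff.mp h with h' | h'
  · rcases Bool.or_eq_true_iff.mp h' with h'' | h''
    · rw [h'']; rfl
    · obtain ⟨w, hw⟩ := Option.isSome_iff_exists.mp h''
      rw [pvSweepStep_mono dep pres c e x w hw]
      simp
  · rw [h']
    simp

theorem pvContrib_ok (dep : List (String × String × String × Int)) (pres : List String) (cache0 c : List (String × List String × List Int)) (x : String)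
    (hv : pvPreVals cache0) (hG : pvGood dep pres cache0 c) (hres : pvResolved dep pres c x = true) :
    ∃ d0, d0 ≤ dep.length + 1 ∧ pvCLs dep pres cache0 d0 x ∧ pvContrib pres c x = pvClosF dep pres cache0 d0 x := by
  by_cases hp : pres.contains x = true
  · refine ⟨1, by omega, pvCLs_settled dep pres cache0 x (Or.inl hp), ?_⟩
    rw [show pvClosF dep pres cache0 1 x = ([], []) from pvClosF_succ_pres dep pres cache0 0 x hp]
    unfold pvContrib
    rw [if_pos hp]
  · have hp' : pres.contains x = false := Bool.eq_false_iff.mpr hp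
    cases hcx : c.lookup x with
    | some v =>
      rcases pvGood_lookup dep pres cache0 c x v hG hcx with hc0 | ⟨-, -, hveq, hs⟩
      · refine ⟨1, by omega, pvCLs_settled dep pres cache0 x (Or.inr (Or.inl (by simp [hc0]))), ?_⟩
        obtain ⟨vt, vm⟩ := v
        rw [show pvClosF dep pres cache0 1 x = (PySem.Set.ofList vt, PySem.Set.ofList vm) from pvClosF_succ_cached dep pres cache0 0 x vt vm hp' hc0]
        obtain ⟨hn1, hn2⟩ := hv (x, (vt, vm)) (pv_lookup_mem _ _ _ hc0)
        rw [PySem.Set.ofList_eq_self_of_nodup _ hn1, PySem.Set.ofList_eq_self_of_nodup _ hn2]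
        unfold pvContrib
        rw [if_neg hp, hcx]
      · refine ⟨dep.length + 1, le_refl _, hs, ?_⟩
        have : pvCL dep pres cache0 x = pvClosF dep pres cache0 (dep.length + 1) x := hs (dep.length + 3) (by omega)
        rw [← this, ← hveq]
        unfold pvContrib
        rw [if_neg hp, hcx]
    | none =>
      have hdx : dep.lookup x = none := by
        unfold pvResolved at hres
        rcases Bool.or_eq_true_iff.mp hres with h' | h'
        · rcases Bool.or_eq_true_iff.mp h' with h'' | h''
          · exact absurd h'' hp
          · rw [hcx] at h''; simp at h''
        · exact Option.isNone_iff_eq_none.mp h'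
      have hc0 : cache0.lookup x = none := pvGood_lookup_none dep pres cache0 c x hG hcx
      refine ⟨1, by omega, pvCLs_settled dep pres cache0 x (Or.inr (Or.inr hdx)), ?_⟩
      rw [show pvClosF dep pres cache0 1 x = ([x], []) from pvClosF_succ_leaf dep pres cache0 0 x hp' hc0 hdx]
      unfold pvContrib
      rw [if_neg hp, hcx]

theorem pvSweepStep_good (dep : List (String × String × String × Int)) (pres : List String) (cache0 c : List (String × List String × List Int)) (e : String × String × String × Int)
    (hv : pvPreVals cache0) (hdk : (dep.map Prod.fst).Nodup) (he : e ∈ dep)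
    (hG : pvGood dep pres cache0 c) : pvGood dep pres cache0 (pvSweepStep dep pres c e) := by
  obtain ⟨k, l, r, m⟩ := e
  unfold pvSweepStep
  by_cases h1 : ((c.lookup k).isSome || pres.contains k) = true
  · rw [if_pos h1]; exact hG
  · rw [if_neg h1]
    obtain ⟨hkc, hkp⟩ := Bool.or_eq_false_iff.mp (Bool.eq_false_iff.mpr h1)
    have hknone : c.lookup k = none := by
      cases hx : c.lookup k with
      | some w => rw [hx] at hkc; simp at hkc
      | none => rfl
    by_cases h2 : (pvResolved dep pres c l && pvResolved dep pres c r) = true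
    · rw [if_pos h2]
      obtain ⟨hresl, hresr⟩ := Bool.and_eq_true_iff.mp h2
      have hdep : dep.lookup k = some (l, r, m) := pv_mem_lookup dep k (l, r, m) he hdk
      have hc0k : cache0.lookup k = none := pvGood_lookup_none dep pres cache0 c k hG hknone
      obtain ⟨dl, hdl1, hdl2, hdl3⟩ := pvContrib_ok dep pres cache0 c l hv hG hresl
      obtain ⟨dr, hdr1, hdr2, hdr3⟩ := pvContrib_ok dep pres cache0 c r hv hG hresr
      have hval : (PySem.Set.union (PySem.Set.union (pvContrib pres c l).1 (pvContrib pres c r).1) [k],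
                   PySem.Set.union (PySem.Set.union (pvContrib pres c l).2 (pvContrib pres c r).2) [m]) = pvCL dep pres cache0 k := by
        rw [show pvCL dep pres cache0 k = pvClosF dep pres cache0 ((dep.length + 2) + 1) k from rfl,
            pvClosF_succ_node dep pres cache0 (dep.length + 2) k l r m hkp hc0k hdep,
            show pvClosF dep pres cache0 (dep.length + 2) l = pvClosF dep pres cache0 dl l from hdl2 (dep.length + 2) (by omega),
            show pvClosF dep pres cache0 (dep.length + 2) r = pvClosF dep pres cache0 dr r from hdr2 (dep.length + 2) (by omega),
            hdl3, hdr3]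
      rw [show pvDictInsert c k _ = c ++ [(k, (PySem.Set.union (PySem.Set.union (pvContrib pres c l).1 (pvContrib pres c r).1) [k],
                   PySem.Set.union (PySem.Set.union (pvContrib pres c l).2 (pvContrib pres c r).2) [m]))] from pv_insert_absent c k _ hknone]
      refine pvGood_extend dep pres cache0 c k _ hG hknone hkp hval ?_
      intro news hceq hN
      rw [pvNInt_append, show (dep.lookup k).isSome = true by simp [hdep], if_pos rfl]
      have hresl' : pres.contains l = true ∨ dep.lookup l = none ∨ (((cache0 ++ news).lookup l).isSome = true) := by
        rw [← hceq]
        unfold pvResolved at hresl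
        rcases Bool.or_eq_true_iff.mp hresl with h' | h'
        · rcases Bool.or_eq_true_iff.mp h' with h'' | h''
          · exact Or.inl h''
          · exact Or.inr (Or.inr h'')
        · exact Or.inr (Or.inl (Option.isNone_iff_eq_none.mp h'))
      have hresr' : pres.contains r = true ∨ dep.lookup r = none ∨ (((cache0 ++ news).lookup r).isSome = true) := by
        rw [← hceq]
        unfold pvResolved at hresr
        rcases Bool.or_eq_true_iff.mp hresr with h' | h'
        · rcases Bool.or_eq_true_iff.mp h' with h'' | h''
          · exact Or.inl h''
          · exact Or.inr (Or.inr h'')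
        · exact Or.inr (Or.inl (Option.isNone_iff_eq_none.mp h'))
      have hCl := pvChild_CLs dep pres cache0 news l hN hresl'
      have hCr := pvChild_CLs dep pres cache0 news r hN hresr'
      intro g hg
      obtain ⟨g', rfl⟩ : ∃ g', g = g' + 1 := ⟨g - 1, by omega⟩
      rw [show pvNInt dep news + 1 + 1 = (pvNInt dep news + 1) + 1 from rfl,
          pvClosF_succ_node dep pres cache0 g' k l r m hkp hc0k hdep,
          pvClosF_succ_node dep pres cache0 (pvNInt dep news + 1) k l r m hkp hc0k hdep,
          hCl g' (by omega), hCr g' (by omega)]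
    · rw [if_neg h2]; exact hG

theorem pvFold_mono (dep : List (String × String × String × Int)) (pres : List String) (es : List (String × String × String × Int)) (c : List (String × List String × List Int)) (x : String) (v : List String × List Int)
    (h : c.lookup x = some v) : (es.foldl (pvSweepStep dep pres) c).lookup x = some v := by
  induction es generalizing c with
  | nil => exact h
  | cons e es ih => exact ih _ (pvSweepStep_mono dep pres c e x v h)

theorem pvFold_good (dep : List (String × String × String × Int)) (pres : List String) (cache0 : List (String × List String × List Int)) (es : List (String × String × String × Int)) (c : List (String × List String × List Int))
    (hv : pvPreVals cache0) (hdk : (dep.map Prod.fst).Nodup) (hes : ∀ e ∈ es, e ∈ dep)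
    (hG : pvGood dep pres cache0 c) : pvGood dep pres cache0 (es.foldl (pvSweepStep dep pres) c) := by
  induction es generalizing c with
  | nil => exact hG
  | cons e es ih =>
    exact ih _ (fun e' he' => hes e' (List.mem_cons_of_mem _ he'))
      (pvSweepStep_good dep pres cache0 c e hv hdk (hes e List.mem_cons_self) hG)

theorem pvFold_caches (dep : List (String × String × String × Int)) (pres : List String) (es : List (String × String × String × Int)) (c : List (String × List String × List Int)) (k l r : String) (m : Int)
    (he : (k, l, r, m) ∈ es) (hl : pvResolved dep pres c l = true) (hr : pvResolved dep pres c r = true) (hp : pres.contains k = false) :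
    ((es.foldl (pvSweepStep dep pres) c).lookup k).isSome := by
  induction es generalizing c with
  | nil => simp at he
  | cons e es ih =>
    rcases List.mem_cons.mp he with rfl | he'
    · show ((es.foldl (pvSweepStep dep pres) (pvSweepStep dep pres c (k, l, r, m))).lookup k).isSome
      by_cases h1 : ((c.lookup k).isSome || pres.contains k) = true
      · have hsome : (c.lookup k).isSome = true := by
          rcases Bool.or_eq_true_iff.mp h1 with h' | h'
          · exact h'
          · rw [hp] at h'; exact absurd h' Bool.false_ne_true
        obtain ⟨w, hw⟩ := Option.isSome_iff_exists.mp hsome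
        rw [pvFold_mono dep pres es _ k w (pvSweepStep_mono dep pres c _ k w hw)]
        rfl
      · have hknone : c.lookup k = none := by
          have := (Bool.or_eq_false_iff.mp (Bool.eq_false_iff.mpr h1)).1
          cases hx : c.lookup k with
          | some w => rw [hx] at this; simp at this
          | none => rfl
        have hstep : (pvSweepStep dep pres c (k, l, r, m)).lookup k = some
            (PySem.Set.union (PySem.Set.union (pvContrib pres c l).1 (pvContrib pres c r).1) [k],
             PySem.Set.union (PySem.Set.union (pvContrib pres c l).2 (pvContrib pres c r).2) [m]) := by
          unfold pvSweepStep
          rw [if_neg h1, if_pos (by rw [hl, hr]; rfl)]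
          show (pvDictInsert c k _).lookup k = _
          rw [pv_insert_absent c k _ hknone, List.lookup_append, hknone, Option.none_or, pv_lookup_single, if_pos rfl]
        rw [pvFold_mono dep pres es _ k _ hstep]
        rfl
    · exact ih _ he' (pvResolved_mono dep pres c e l hl) (pvResolved_mono dep pres c e r hr)

-- plain sweeps without the break, fold applied last
def pvPlain (dep : List (String × String × String × Int)) (pres : List String) : Nat → List (String × List String × List Int) → List (String × List String × List Int)
  | 0, c => c
  | Nat.succ n, c => dep.foldl (pvSweepStep dep pres) (pvPlain dep pres n c)

theorem pvPlain_comm (dep : List (String × String × String × Int)) (pres : List String) (n : Nat) (c : List (String × List String × List Int)) :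
    pvPlain dep pres (n + 1) c = pvPlain dep pres n (dep.foldl (pvSweepStep dep pres) c) := by
  induction n generalizing c with
  | zero => rfl
  | succ n ih =>
    show dep.foldl (pvSweepStep dep pres) (pvPlain dep pres (n + 1) c) = _
    rw [ih c]
    rfl

theorem pvPlain_good (dep : List (String × String × String × Int)) (pres : List String) (cache0 : List (String × List String × List Int)) (n : Nat) (c : List (String × List String × List Int))
    (hv : pvPreVals cache0) (hdk : (dep.map Prod.fst).Nodup)
    (hG : pvGood dep pres cache0 c) : pvGood dep pres cache0 (pvPlain dep pres n c) := by
  induction n with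
  | zero => exact hG
  | succ n ih => exact pvFold_good dep pres cache0 dep _ hv hdk (fun e he => he) ih

theorem pvPlain_caches (dep : List (String × String × String × Int)) (pres : List String) (cache0 : List (String × List String × List Int))
    (hv : pvPreVals cache0) (hdk : (dep.map Prod.fst).Nodup) :
    ∀ d k c n, pvFrontIter dep pres cache0 d [k] = [] → d ≤ n → pres.contains k = false → cache0.lookup k = none → (dep.lookup k).isSome →
      pvGood dep pres cache0 c → ((pvPlain dep pres n c).lookup k).isSome := by
  intro d
  induction d with
  | zero =>
    intro k c n hd
    simp [pvFrontIter] at hd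
  | succ e ih =>
    intro k c n hd hdn hkp hkc hkd hG
    obtain ⟨n', rfl⟩ : ∃ n', n = n' + 1 := ⟨n - 1, by omega⟩
    obtain ⟨lrm, hklook⟩ := Option.isSome_iff_exists.mp hkd
    obtain ⟨l, r, m⟩ := lrm
    have hGb : pvGood dep pres cache0 (pvPlain dep pres n' c) := pvPlain_good dep pres cache0 n' c hv hdk hG
    have hres : ∀ x, (x = l ∨ x = r) → pvResolved dep pres (pvPlain dep pres n' c) x = true := by
      intro x hx
      unfold pvResolved
      by_cases hxp : pres.contains x = true
      · rw [hxp]; rfl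
      · have hxp' : pres.contains x = false := Bool.eq_false_iff.mpr hxp
        cases hxd : dep.lookup x with
        | none => simp
        | some w =>
          cases hxc : cache0.lookup x with
          | some v =>
            rw [pvGood_cache0 dep pres cache0 _ x v hGb hxc]
            simp
          | none =>
            have hnb := pvNbrs_mem dep pres cache0 k l r x m hkp hkc hklook hx hxp' hxc (by simp [hxd])
            have hdx : pvFrontIter dep pres cache0 e [x] = [] := by
              apply List.eq_nil_iff_forall_not_mem.mpr
              intro y hy
              have hyy := pvFront_child dep pres cache0 k x e hnb y hy
              rw [hd] at hyy
              simp at hyy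
            rw [ih x c n' hdx (by omega) hxp' hxc (by simp [hxd]) hG]
            simp
    show ((dep.foldl (pvSweepStep dep pres) (pvPlain dep pres n' c)).lookup k).isSome
    exact pvFold_caches dep pres dep _ k l r m (pv_lookup_mem _ _ _ hklook) (hres l (Or.inl rfl)) (hres r (Or.inr rfl)) hkp

theorem pvSweeps_some (dep : List (String × String × String × Int)) (pres : List String) (token : String) (n : Nat) (c : List (String × List String × List Int))
    (h : ((pvPlain dep pres n c).lookup token).isSome) : ((pvSweeps dep pres token n c).lookup token).isSome := by
  induction n generalizing c with
  | zero => exact h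
  | succ n ih =>
    show ((if (c.lookup token).isSome then c else pvSweeps dep pres token n (dep.foldl (pvSweepStep dep pres) c)).lookup token).isSome
    by_cases hc : (c.lookup token).isSome
    · rw [if_pos hc]; exact hc
    · rw [if_neg hc]
      apply ih
      rw [← pvPlain_comm]
      exact h

theorem pvSweeps_good (dep : List (String × String × String × Int)) (pres : List String) (token : String) (cache0 : List (String × List String × List Int)) (n : Nat) (c : List (String × List String × List Int))
    (hv : pvPreVals cache0) (hdk : (dep.map Prod.fst).Nodup)
    (hG : pvGood dep pres cache0 c) : pvGood dep pres cache0 (pvSweeps dep pres token n c) := by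
  induction n generalizing c with
  | zero => exact hG
  | succ n ih =>
    show pvGood dep pres cache0 (if (c.lookup token).isSome then c else pvSweeps dep pres token n (dep.foldl (pvSweepStep dep pres) c))
    by_cases hc : (c.lookup token).isSome
    · rw [if_pos hc]; exact hG
    · rw [if_neg hc]
      exact ih _ (pvFold_good dep pres cache0 dep c hv hdk (fun e he => he) hG)

-- ===== VERDICT (by name: the statement is the Claim_ definition above) =====
theorem compute_token_closure_spec : Claim_equal_compute_token_closure := by
  unfold Claim_equal_compute_token_closure
  intro token dep pres cache hDom hPre
  unfold Spec_compute_token_closure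
  obtain ⟨hfront, hdk, hck, hcv⟩ := hPre
  have hv : pvPreVals cache := hcv
  have hA : compute_token_closure token dep pres cache = pvCL dep pres cache token := by
    obtain ⟨c', heq, -, -, -, -⟩ := pvA_main dep pres cache hv (dep.length + 1) token cache (dep.length + 2)
      hfront (le_refl _) (by omega) (pvGood_init dep pres cache)
    unfold compute_token_closure
    rw [heq]
  rw [hA]
  unfold compute_token_closure_alt
  by_cases hp : pres.contains token = true
  · rw [if_pos hp]
    exact pvClosF_succ_pres dep pres cache (dep.length + 2) token hp
  · have hp' : pres.contains token = false := Bool.eq_false_iff.mpr hp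
    rw [if_neg hp]
    cases hc : cache.lookup token with
    | some p =>
      obtain ⟨ct, cm⟩ := p
      exact pvClosF_succ_cached dep pres cache (dep.length + 2) token ct cm hp' hc
    | none =>
      cases hdtok : dep.lookup token with
      | none => exact pvClosF_succ_leaf dep pres cache (dep.length + 2) token hp' hc hdtok
      | some lrm =>
        have hGfin : pvGood dep pres cache (pvSweeps dep pres token (dep.length + 1) cache) :=
          pvSweeps_good dep pres token cache (dep.length + 1) cache hv hdk (pvGood_init dep pres cache)
        have hsome : ((pvSweeps dep pres token (dep.length + 1) cache).lookup token).isSome :=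
          pvSweeps_some dep pres token (dep.length + 1) cache
            (pvPlain_caches dep pres cache hv hdk (dep.length + 1) token cache (dep.length + 1)
              hfront (le_refl _) hp' hc (by simp [hdtok]) (pvGood_init dep pres cache))
        obtain ⟨v, hvf⟩ := Option.isSome_iff_exists.mp hsome
        obtain ⟨vt, vm⟩ := v
        rcases pvGood_lookup dep pres cache _ token (vt, vm) hGfin hvf with hc0v | ⟨-, -, hveq, -⟩
        · rw [hc] at hc0v; simp at hc0v
        · rw [hvf]
          have : (PySem.Set.ofList vt, PySem.Set.ofList vm) = pvCL dep pres cache token := by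
            rw [show vt = (pvCL dep pres cache token).1 by rw [← hveq],
                show vm = (pvCL dep pres cache token).2 by rw [← hveq]]
            exact pvCL_ofList dep pres cache token
          exact this.symm
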